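-- pv_equiv track=rewrite | github.com/parkerahall/dailycodingchallenge | 2-14-19.py | make_valid_moves
-- ===== SOURCE A (Python) =====
-- def make_valid_moves(N):
--     valid_moves = {}
--     for i in range(N):
--         for j in range(N):
--             moves = []
--             for i_diff in [-1, 1]:
--                 for j_diff in [-2, 2]:
--                     new_i, new_j = i + i_diff, j + j_diff
--                     if new_i >= 0 and new_i < N and new_j >= 0 and new_j < N:
--                         moves.append((new_i, new_j))
--             for i_diff in [-2, 2]:
--                 for j_diff in [-1, 1]:
--                     new_i, new_j = i + i_diff, j + j_diff
--                     if new_i >= 0 and new_i < N and new_j >= 0 and new_j < N: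
--                         moves.append((new_i, new_j))
--             valid_moves[(i, j)] = moves
--     return valid_moves
-- ===== SOURCE B (Python) =====
-- OFFSETS = [(-1, -2), (-1, 2), (1, -2), (1, 2), (-2, -1), (-2, 1), (2, -1), (2, 1)]
--
-- def make_valid_moves(N):
--     valid_moves = {}
--     for i in range(N):
--         for j in range(N):
--             valid_moves[(i, j)] = []
--     for di, dj in OFFSETS:
--         j_range = range(max(0, -dj), min(N, N - dj))
--         for i in range(max(0, -di), min(N, N - di)):
--             ni = i + di
--             for j in j_range:
--                 valid_moves[(i, j)].append((ni, j + dj))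
--     return valid_moves
-- ===== Notes on version B (the rewrite author's own statement) =====
-- stated objective: alternative
-- what changed: B pre-initializes every cell's move list and then sweeps the knight offsets as the outer loop, appending each move over arithmetically pre-clipped source index ranges, instead of A's per-cell, per-offset bounds test.
import Mathlib
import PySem

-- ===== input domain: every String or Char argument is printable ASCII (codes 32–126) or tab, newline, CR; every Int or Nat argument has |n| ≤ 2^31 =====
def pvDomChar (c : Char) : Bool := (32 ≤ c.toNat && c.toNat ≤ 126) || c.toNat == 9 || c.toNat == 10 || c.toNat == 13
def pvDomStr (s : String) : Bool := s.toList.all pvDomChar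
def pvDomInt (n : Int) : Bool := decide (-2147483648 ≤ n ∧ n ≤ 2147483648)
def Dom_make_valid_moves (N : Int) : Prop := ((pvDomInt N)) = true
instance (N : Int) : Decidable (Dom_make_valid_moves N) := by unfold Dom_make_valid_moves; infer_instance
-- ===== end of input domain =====

-- B sweeps the 8 knight offsets in an outer loop and appends to pre-initialized per-cell lists
-- over arithmetically pre-clipped source ranges, instead of A's per-cell per-offset bounds test
-- (objective: alternative decomposition, same order of cells and of each cell's moves).

-- ===== PORT A =====
-- helper: the 'moves' list A builds for cell (i, j) (the body of A's two offset loop nests)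
def mvmMovesA (N i j : Int) : List (Int × Int) :=
  let moves : List (Int × Int) := []
  let moves := [(-1 : Int), 1].foldl (fun moves i_diff =>
    [(-2 : Int), 2].foldl (fun moves j_diff =>
      if i + i_diff ≥ 0 ∧ i + i_diff < N ∧ j + j_diff ≥ 0 ∧ j + j_diff < N then
        moves ++ [(i + i_diff, j + j_diff)]
      else moves) moves) moves
  [(-2 : Int), 2].foldl (fun moves i_diff =>
    [(-1 : Int), 1].foldl (fun moves j_diff =>
      if i + i_diff ≥ 0 ∧ i + i_diff < N ∧ j + j_diff ≥ 0 ∧ j + j_diff < N then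
        moves ++ [(i + i_diff, j + j_diff)]
      else moves) moves) moves

def make_valid_moves (N : Int) : List (Int × Int × List (Int × Int)) :=
  let valid_moves : PySem.Dict (Int × Int) (List (Int × Int)) :=
    (PySem.List.pyRange 0 N 1).foldl (fun valid_moves i =>
      (PySem.List.pyRange 0 N 1).foldl (fun valid_moves j =>
        valid_moves.insert (i, j) (mvmMovesA N i j)) valid_moves) PySem.Dict.empty
  valid_moves.items.map (fun p => (p.1.1, p.1.2, p.2))

-- ===== PORT B =====
def mvmOffsets : List (Int × Int) :=
  [(-1, -2), (-1, 2), (1, -2), (1, 2), (-2, -1), (-2, 1), (2, -1), (2, 1)]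

def make_valid_moves_alt (N : Int) : List (Int × Int × List (Int × Int)) :=
  let valid_moves : PySem.Dict (Int × Int) (List (Int × Int)) :=
    (PySem.List.pyRange 0 N 1).foldl (fun valid_moves i =>
      (PySem.List.pyRange 0 N 1).foldl (fun valid_moves j =>
        valid_moves.insert (i, j) ([] : List (Int × Int))) valid_moves) PySem.Dict.empty
  let valid_moves :=
    mvmOffsets.foldl (fun valid_moves od =>
      (PySem.List.pyRange (max 0 (-od.1)) (min N (N - od.1)) 1).foldl (fun valid_moves i =>
        (PySem.List.pyRange (max 0 (-od.2)) (min N (N - od.2)) 1).foldl (fun valid_moves j =>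
          valid_moves.modify (i, j) [] (fun m => m ++ [(i + od.1, j + od.2)])) valid_moves)
        valid_moves) valid_moves
  valid_moves.items.map (fun p => (p.1.1, p.1.2, p.2))

-- ===== PRECONDITION & SPEC =====
def Spec_make_valid_moves (N : Int) (out : List (Int × Int × List (Int × Int))) : Prop := out = make_valid_moves_alt N
instance (N : Int) (out : List (Int × Int × List (Int × Int))) : Decidable (Spec_make_valid_moves N out) := by unfold Spec_make_valid_moves; infer_instance

-- ===== CLAIM (what is proved, stated in full; the proofs are below) =====
def Claim_equal_make_valid_moves : Prop := ∀ (N : Int), Dom_make_valid_moves N → Spec_make_valid_moves N (make_valid_moves N)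

-- ===== LEMMAS AND PROOFS =====

-- the list of board cells in A's (and B's initialization) insertion order
def mvmCells (N : Int) : List (Int × Int) :=
  (PySem.List.pyRange 0 N 1).flatMap (fun i => (PySem.List.pyRange 0 N 1).map (fun j => (i, j)))

-- B's offset sweep, flattened to one list of (cell, move) modifications in order
def mvmPairs (N : Int) : List ((Int × Int) × (Int × Int)) :=
  mvmOffsets.flatMap (fun od =>
    (PySem.List.pyRange (max 0 (-od.1)) (min N (N - od.1)) 1).flatMap (fun i =>
      (PySem.List.pyRange (max 0 (-od.2)) (min N (N - od.2)) 1).map (fun j =>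
        ((i, j), (i + od.1, j + od.2)))))

lemma mvmCells_nodup (N : Int) : (mvmCells N).Nodup := by
  have h : mvmCells N = (PySem.List.pyRange 0 N 1) ×ˢ (PySem.List.pyRange 0 N 1) := rfl
  rw [h]
  exact List.Nodup.product (PySem.List.nodup_pyRange_one 0 N) (PySem.List.nodup_pyRange_one 0 N)

lemma mem_mvmCells {N i j : Int} : (i, j) ∈ mvmCells N ↔ 0 ≤ i ∧ i < N ∧ 0 ≤ j ∧ j < N := by
  rw [mvmCells, List.mem_flatMap]
  constructor
  · rintro ⟨a, ha, hm⟩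
    rw [List.mem_map] at hm
    obtain ⟨b, hb, heq⟩ := hm
    obtain ⟨rfl, rfl⟩ := Prod.mk.injEq a b i j ▸ (by exact ⟨congrArg Prod.fst heq, congrArg Prod.snd heq⟩ : a = i ∧ b = j)
    rw [PySem.List.mem_pyRange_one] at ha hb
    exact ⟨ha.1, ha.2, hb.1, hb.2⟩
  · rintro ⟨h1, h2, h3, h4⟩
    exact ⟨i, PySem.List.mem_pyRange_one.mpr ⟨h1, h2⟩,
      List.mem_map.mpr ⟨j, PySem.List.mem_pyRange_one.mpr ⟨h3, h4⟩, rfl⟩⟩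

lemma fold_insert_items (N : Int) (v : Int → Int → List (Int × Int)) :
    ((PySem.List.pyRange 0 N 1).foldl (fun d i =>
      (PySem.List.pyRange 0 N 1).foldl (fun d j => d.insert (i, j) (v i j)) d)
      (PySem.Dict.empty : PySem.Dict (Int × Int) (List (Int × Int)))).items
    = (mvmCells N).map (fun c => (c, v c.1 c.2)) := by
  have h : ((PySem.List.pyRange 0 N 1).foldl (fun d i =>
      (PySem.List.pyRange 0 N 1).foldl (fun d j => d.insert (i, j) (v i j)) d)
      (PySem.Dict.empty : PySem.Dict (Int × Int) (List (Int × Int))))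
      = (mvmCells N).foldl (fun d c => d.insert c (v c.1 c.2)) PySem.Dict.empty := by
    rw [mvmCells, List.foldl_flatMap]
    simp only [List.foldl_map]
  rw [h]
  have := PySem.Dict.items_foldl_insert_fresh (mvmCells N) (fun c => c) (fun c => v c.1 c.2)
      (PySem.Dict.empty : PySem.Dict (Int × Int) (List (Int × Int)))
      (fun a _ => PySem.Dict.contains_empty _)
      (by simpa using mvmCells_nodup N)
  simpa using this

lemma foldB_eq (N : Int) (d : PySem.Dict (Int × Int) (List (Int × Int))) :
    mvmOffsets.foldl (fun d od =>
      (PySem.List.pyRange (max 0 (-od.1)) (min N (N - od.1)) 1).foldl (fun d i =>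
        (PySem.List.pyRange (max 0 (-od.2)) (min N (N - od.2)) 1).foldl (fun d j =>
          d.modify (i, j) [] (fun m => m ++ [(i + od.1, j + od.2)])) d) d) d
    = (mvmPairs N).foldl (fun d p => d.modify p.1 [] (fun m => m ++ [p.2])) d := by
  rw [mvmPairs, List.foldl_flatMap]
  simp only [List.foldl_flatMap, List.foldl_map]

lemma set_update_of_mem {α : Type} [BEq α] [LawfulBEq α] (s : List α) (l : List α)
    (h : ∀ x ∈ l, x ∈ s) : PySem.Set.update s l = s := by
  induction l with
  | nil => rfl
  | cons x l ih =>
    have hx : PySem.Set.add s x = s := by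
      simp [PySem.Set.add, PySem.Set.contains, h x (by simp)]
    simp only [PySem.Set.update, List.foldl_cons, hx]
    exact ih (fun y hy => h y (by simp [hy]))

lemma mvmPairs_keys_mem (N : Int) : ∀ p ∈ mvmPairs N, p.1 ∈ mvmCells N := by
  intro p hp
  simp only [mvmPairs, List.mem_flatMap, List.mem_map] at hp
  obtain ⟨od, _, i, hi, j, hj, rfl⟩ := hp
  rw [PySem.List.mem_pyRange_one] at hi hj
  exact mem_mvmCells.mpr (by constructor <;> omega)

lemma filter_beq_of_nodup {α : Type} [BEq α] [LawfulBEq α] (l : List α) (h : l.Nodup) (a : α) :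
    l.filter (· == a) = if a ∈ l then [a] else [] := by
  induction l with
  | nil => simp
  | cons x l ih =>
    rw [List.nodup_cons] at h
    by_cases hxa : x = a
    · subst hxa
      simp [ih h.2, h.1]
    · simp [hxa, ih h.2, Ne.symm hxa]

lemma prodfilter {β : Type} (li lj : List Int) (hli : li.Nodup) (hlj : lj.Nodup)
    (f : Int → Int → β) (i j : Int) :
    ((li.flatMap (fun a => lj.map (fun b => ((a, b), f a b)))).filter
      (fun p => p.1 == (i, j))).map (·.2)
    = if i ∈ li ∧ j ∈ lj then [f i j] else [] := by
  induction li with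
  | nil => simp
  | cons a li ih =>
    rw [List.nodup_cons] at hli
    have hhead : ((lj.map (fun b => ((a, b), f a b))).filter (fun p => p.1 == (i, j))).map (·.2)
        = if a = i ∧ j ∈ lj then [f i j] else [] := by
      rw [List.filter_map]
      by_cases hai : a = i
      · subst hai
        have hc : ((fun p => p.1 == (a, j)) ∘ (fun b => ((a, b), f a b))) = (fun b => b == j) := by
          funext b; simp [Function.comp, Prod.ext_iff]
        rw [hc, filter_beq_of_nodup lj hlj j]
        by_cases hm : j ∈ lj <;> simp [hm]
      · have hc : ∀ b ∈ lj, ¬ ((fun p => p.1 == (i, j)) ∘ (fun b => ((a, b), f a b))) b = true := by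
          intro b _; simp [Function.comp, Prod.ext_iff, hai]
        rw [List.filter_eq_nil_iff.mpr hc]
        simp [hai]
    simp only [List.flatMap_cons, List.filter_append, List.map_append, hhead, ih hli.2]
    by_cases hai : a = i
    · subst hai
      simp [hli.1]
    · simp [hai, Ne.symm hai]

lemma piece_eq (N i j di dj : Int) (hi : 0 ≤ i) (hi' : i < N) (hj : 0 ≤ j) (hj' : j < N) :
    (if i ∈ PySem.List.pyRange (max 0 (-di)) (min N (N - di)) 1
        ∧ j ∈ PySem.List.pyRange (max 0 (-dj)) (min N (N - dj)) 1
      then [(i + di, j + dj)] else ([] : List (Int × Int)))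
    = if i + di ≥ 0 ∧ i + di < N ∧ j + dj ≥ 0 ∧ j + dj < N then [(i + di, j + dj)] else [] := by
  refine if_congr ?_ rfl rfl
  rw [PySem.List.mem_pyRange_one, PySem.List.mem_pyRange_one]
  omega

lemma ite_append_singleton {α : Type} (c : Prop) [Decidable c] (m : List α) (x : α) :
    (if c then m ++ [x] else m) = m ++ (if c then [x] else []) := by
  split_ifs <;> simp

lemma cell_filter (N i j : Int) (hi : 0 ≤ i) (hi' : i < N) (hj : 0 ≤ j) (hj' : j < N) :
    mvmMovesA N i j = ((mvmPairs N).filter (fun p => p.1 == (i, j))).map (·.2) := by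
  have hblock : ∀ di dj : Int,
      (((PySem.List.pyRange (max 0 (-di)) (min N (N - di)) 1).flatMap (fun i' =>
        (PySem.List.pyRange (max 0 (-dj)) (min N (N - dj)) 1).map (fun j' =>
          ((i', j'), (i' + di, j' + dj))))).filter (fun p => p.1 == (i, j))).map (·.2)
      = if i + di ≥ 0 ∧ i + di < N ∧ j + dj ≥ 0 ∧ j + dj < N
          then [(i + di, j + dj)] else [] := by
    intro di dj
    rw [prodfilter _ _ (PySem.List.nodup_pyRange_one _ _) (PySem.List.nodup_pyRange_one _ _)]
    exact piece_eq N i j di dj hi hi' hj hj'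
  simp only [mvmPairs, mvmOffsets, List.flatMap_cons, List.flatMap_nil, List.append_nil,
    List.filter_append, List.map_append, hblock]
  simp [mvmMovesA, ite_append_singleton]

-- ===== VERDICT (by name: the statement is the Claim_ definition above) =====
theorem make_valid_moves_spec : Claim_equal_make_valid_moves := by
  intro N _
  show make_valid_moves N = make_valid_moves_alt N
  simp only [make_valid_moves, make_valid_moves_alt]
  rw [foldB_eq]
  set d0 : PySem.Dict (Int × Int) (List (Int × Int)) :=
    (PySem.List.pyRange 0 N 1).foldl (fun d i =>
      (PySem.List.pyRange 0 N 1).foldl (fun d j => d.insert (i, j) ([] : List (Int × Int))) d)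
      PySem.Dict.empty with hd0
  have hitems0 : d0.items = (mvmCells N).map (fun c => (c, ([] : List (Int × Int)))) :=
    fold_insert_items N (fun _ _ => [])
  have hkeys0 : d0.keys = mvmCells N := by
    show d0.items.map (·.1) = mvmCells N
    rw [hitems0]; simp [Function.comp_def]
  have hnodup0 : d0.keys.Nodup := by rw [hkeys0]; exact mvmCells_nodup N
  set dB : PySem.Dict (Int × Int) (List (Int × Int)) :=
    (mvmPairs N).foldl (fun d p => d.modify p.1 [] (fun m => m ++ [p.2])) d0 with hdB
  have hkeysB : dB.keys = mvmCells N := by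
    rw [hdB, PySem.Dict.keys_foldl_modify_key (mvmPairs N) (fun p => p.1) [] (fun _ p => fun m => m ++ [p.2]) d0,
      hkeys0]
    exact set_update_of_mem _ _ (by
      intro x hx
      simp only [List.mem_map] at hx
      obtain ⟨p, hp, rfl⟩ := hx
      exact mvmPairs_keys_mem N p hp)
  have hnodupB : dB.keys.Nodup := by rw [hkeysB]; exact mvmCells_nodup N
  have hgetD : ∀ c ∈ mvmCells N, dB.getD c [] = mvmMovesA N c.1 c.2 := by
    intro c hc
    have h0 : d0.getD c [] = [] := by
      refine PySem.Dict.getD_of_mem_items d0 ?_ hnodup0 []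
      rw [hitems0]
      exact List.mem_map.mpr ⟨c, hc, rfl⟩
    rw [hdB, PySem.Dict.getD_foldl_modify_append, h0, List.nil_append]
    obtain ⟨i, j⟩ := c
    obtain ⟨h1, h2, h3, h4⟩ := mem_mvmCells.mp hc
    exact (cell_filter N i j h1 h2 h3 h4).symm
  have hitemsA : ((PySem.List.pyRange 0 N 1).foldl (fun d i =>
      (PySem.List.pyRange 0 N 1).foldl (fun d j => d.insert (i, j) (mvmMovesA N i j)) d)
      (PySem.Dict.empty : PySem.Dict (Int × Int) (List (Int × Int)))).items
      = (mvmCells N).map (fun c => (c, mvmMovesA N c.1 c.2)) := fold_insert_items N (mvmMovesA N)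
  have hitemsB : dB.items = (mvmCells N).map (fun c => (c, mvmMovesA N c.1 c.2)) := by
    rw [PySem.Dict.items_eq_map_keys dB hnodupB [], hkeysB]
    exact List.map_congr_left (fun c hc => by rw [hgetD c hc])
  rw [hitemsA, hitemsB]
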